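-- pv_equiv track=rewrite | github.com/Rupak143/NLPMINE | 8.py | train_pos_tagger
-- ===== SOURCE A (Python) =====
-- from collections import Counter, defaultdict
--
-- def train_pos_tagger(corpus):
--     """
--     Train a simple unigram POS tagger based on a given corpus.
--     """
--     # Flatten the corpus into a list of (word, tag) pairs
--     word_tag_pairs = [(word.lower(), tag) for sent in corpus for word, tag in sent]
--
--     # Count occurrences of each tag for each word
--     word_tag_counts = defaultdict(Counter)
--     for word, tag in word_tag_pairs:
--         word_tag_counts[word][tag] += 1
--
--     # Calculate probabilities (most frequent tag for each word)
--     tag_probabilities = {}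
--     for word, tag_count in word_tag_counts.items():
--         tag_probabilities[word] = max(tag_count, key=tag_count.get)
--
--     return tag_probabilities
-- ===== SOURCE B (Python) =====
-- from collections import Counter
--
-- def train_pos_tagger(corpus):
--     """
--     Train a simple unigram POS tagger based on a given corpus.
--     """
--     # One flat Counter keyed by the (lowercased word, tag) pair
--     pair_counts = Counter((word.lower(), tag)
--                           for sent in corpus for word, tag in sent)
--     # Single selection pass: keep the tag only on a strictly greater count,
--     # which reproduces the first-seen tie-break of per-word max().
--     best_count = {}
--     result = {}
--     for (word, tag), count in pair_counts.items():
--         if word not in best_count or count > best_count[word]: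
--             best_count[word] = count
--             result[word] = tag
--     return result
-- ===== Notes on version B (the rewrite author's own statement) =====
-- stated objective: faster
-- what changed: Replaced A's nested defaultdict-of-Counter plus a per-word max(key=get) pass by one flat Counter keyed by the (lowercased word, tag) pair and a single selection sweep over its items that keeps a tag only on a strictly greater count (reproducing A's first-seen tie-break).
import Mathlib
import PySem

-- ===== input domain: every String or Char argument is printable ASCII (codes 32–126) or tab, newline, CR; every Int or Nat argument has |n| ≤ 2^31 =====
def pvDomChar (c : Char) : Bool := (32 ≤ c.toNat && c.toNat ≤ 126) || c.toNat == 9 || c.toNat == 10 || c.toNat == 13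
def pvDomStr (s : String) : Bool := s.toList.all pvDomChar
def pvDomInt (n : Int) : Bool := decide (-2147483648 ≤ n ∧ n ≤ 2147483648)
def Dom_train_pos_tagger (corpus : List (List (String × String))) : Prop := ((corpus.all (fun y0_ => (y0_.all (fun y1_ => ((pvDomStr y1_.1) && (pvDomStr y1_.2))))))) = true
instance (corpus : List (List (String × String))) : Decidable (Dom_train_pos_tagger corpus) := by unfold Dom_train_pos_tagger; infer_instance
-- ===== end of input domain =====

-- B replaces A's nested dict-of-Counter + per-word max() by one flat (word, tag) Counter
-- and a single strict-greater selection sweep (alternative decomposition, same cost class).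

-- ===== PORT A =====
-- max(tag_count, key=tag_count.get) iterates the Counter's keys in insertion order and keeps the
-- first maximal one = PySem.List.maxD; its "" default is unreachable (every counter is nonempty).
def train_pos_tagger (corpus : List (List (String × String))) : List (String × String) :=
  let word_tag_pairs := corpus.flatMap (fun sent => sent.map (fun wt => (PySem.Str.lower wt.1, wt.2)))
  let word_tag_counts := word_tag_pairs.foldl
    (fun d p => d.modify p.1 (PySem.Dict.empty : PySem.Dict String Int) (fun cnt => cnt.modify p.2 0 (· + 1)))
    PySem.Dict.empty
  let tag_probabilities := word_tag_counts.items.foldl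
    (fun r it => r.insert it.1 (PySem.List.maxD it.2.keys (fun t => it.2.getD t 0) ""))
    PySem.Dict.empty
  tag_probabilities.items

-- ===== PORT B =====
def train_pos_tagger_alt (corpus : List (List (String × String))) : List (String × String) :=
  let pair_counts := PySem.Dict.counter
    (corpus.flatMap (fun sent => sent.map (fun wt => (PySem.Str.lower wt.1, wt.2))))
  let st := pair_counts.items.foldl
    (fun (st : PySem.Dict String Int × PySem.Dict String String) it =>
      if !st.1.contains it.1.1 || decide (st.1.getD it.1.1 0 < it.2) then
        (st.1.insert it.1.1 it.2, st.2.insert it.1.1 it.1.2)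
      else st)
    (PySem.Dict.empty, PySem.Dict.empty)
  st.2.items

-- ===== PRECONDITION & SPEC =====
def Spec_train_pos_tagger (corpus : List (List (String × String))) (out : List (String × String)) : Prop := out = train_pos_tagger_alt corpus
instance (corpus : List (List (String × String))) (out : List (String × String)) : Decidable (Spec_train_pos_tagger corpus out) := by unfold Spec_train_pos_tagger; infer_instance

-- ===== CLAIM (what is proved, stated in full; the proofs are below) =====
def Claim_equal_train_pos_tagger : Prop := ∀ (corpus : List (List (String × String))), Dom_train_pos_tagger corpus → Spec_train_pos_tagger corpus (train_pos_tagger corpus)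

-- ===== LEMMAS AND PROOFS =====

-- proof-only helpers: the flattened pair list, a word's tag list, and the canonical result
-- both ports are shown equal to pvCanon (pvPairs corpus)
def pvPairs (corpus : List (List (String × String))) : List (String × String) :=
  corpus.flatMap (fun sent => sent.map (fun wt => (PySem.Str.lower wt.1, wt.2)))

def pvTags (ps : List (String × String)) (w : String) : List String :=
  (ps.filter (fun p => p.1 == w)).map Prod.snd

def pvCanon (ps : List (String × String)) : List (String × String) :=
  (PySem.Set.ofList (ps.map Prod.fst)).map (fun w =>
    (w, PySem.List.maxD (PySem.Set.ofList (pvTags ps w)) (fun t => ((pvTags ps w).count t : Int)) ""))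

-- B's loop pieces, named for the invariant proof
def pvUpd (acc : Option (String × Int)) (tc : String × Int) : Option (String × Int) :=
  match acc with
  | none => some tc
  | some b => if b.2 < tc.2 then some tc else acc

def pvSel (L : List ((String × String) × Int)) (w : String) : Option (String × Int) :=
  ((L.filter (fun it => it.1.1 == w)).map (fun it => (it.1.2, it.2))).foldl pvUpd none

def pvW (L : List ((String × String) × Int)) : List String :=
  PySem.Set.ofList (L.map (fun it => it.1.1))

def pvStep (st : PySem.Dict String Int × PySem.Dict String String)
    (it : (String × String) × Int) : PySem.Dict String Int × PySem.Dict String String :=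
  if !st.1.contains it.1.1 || decide (st.1.getD it.1.1 0 < it.2) then
    (st.1.insert it.1.1 it.2, st.2.insert it.1.1 it.1.2)
  else st

-- A's grouping loop, looked up at one word, is the counter of that word's tags
lemma pv_A_getD (l : List (String × String)) (d : PySem.Dict String (PySem.Dict String Int)) (w : String) :
    (l.foldl (fun d p => d.modify p.1 (PySem.Dict.empty : PySem.Dict String Int) (fun cnt => cnt.modify p.2 0 (· + 1))) d).getD w PySem.Dict.empty
    = ((l.filter (fun p => p.1 == w)).map Prod.snd).foldl (fun cnt t => cnt.modify t 0 (· + 1)) (d.getD w PySem.Dict.empty) := by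
  induction l generalizing d with
  | nil => rfl
  | cons p t ih =>
    simp only [List.foldl_cons, List.filter_cons]
    rw [ih]
    by_cases h : p.1 = w
    · simp [h, PySem.Dict.getD_modify]
    · simp [h, PySem.Dict.getD_modify, Ne.symm h]

lemma pv_maxD_congr {α κ : Type} [LT κ] [DecidableLT κ] (xs : List α) (f g : α → κ) (d : α)
    (h : ∀ x, f x = g x) : PySem.List.maxD xs f d = PySem.List.maxD xs g d := by
  have : f = g := funext h
  rw [this]

lemma pv_upd_isSome (l : List (String × Int)) (b : String × Int) :
    (l.foldl pvUpd (some b)).isSome = true := by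
  induction l generalizing b with
  | nil => rfl
  | cons tc t ih =>
    show (t.foldl pvUpd (pvUpd (some b) tc)).isSome = true
    rw [show pvUpd (some b) tc = if b.2 < tc.2 then some tc else some b from rfl]
    split
    · apply ih
    · apply ih

lemma pv_sel_isSome_iff (L : List ((String × String) × Int)) (w : String) :
    (pvSel L w).isSome = true ↔ w ∈ pvW L := by
  unfold pvSel pvW
  rcases hf : L.filter (fun it => it.1.1 == w) with _ | ⟨h, t⟩
  · simp only [hf, List.map_nil, List.foldl_nil, Option.isSome_none]
    simp only [List.filter_eq_nil_iff] at hf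
    constructor
    · intro hc; cases hc
    · intro hm
      rw [PySem.Set.mem_ofList] at hm
      obtain ⟨it, hit, rfl⟩ := List.mem_map.mp hm
      have := hf it hit
      simp at this
  · simp only [hf, List.map_cons, List.foldl_cons]
    constructor
    · intro _
      rw [PySem.Set.mem_ofList]
      have : h ∈ L.filter (fun it => it.1.1 == w) := by rw [hf]; exact List.mem_cons_self
      have hm := List.mem_of_mem_filter this
      have heq : h.1.1 = w := by simpa using List.of_mem_filter this
      exact List.mem_map.mpr ⟨h, hm, heq⟩
    · intro _
      show (t.map _ |>.foldl pvUpd (pvUpd none (h.1.2, h.2))).isSome = true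
      exact pv_upd_isSome _ _

lemma pv_sel_append (L : List ((String × String) × Int)) (x : (String × String) × Int) (w : String) :
    pvSel (L ++ [x]) w = if x.1.1 = w then pvUpd (pvSel L w) (x.1.2, x.2) else pvSel L w := by
  by_cases h : x.1.1 = w <;>
    simp [pvSel, List.filter_append, List.map_append, List.foldl_append, h]

lemma pv_W_append (L : List ((String × String) × Int)) (x : (String × String) × Int) :
    pvW (L ++ [x]) = PySem.Set.add (pvW L) x.1.1 := by
  simp [pvW, List.map_append, PySem.Set.ofList_append_singleton]

lemma pv_count_pair (xs : List (String × String)) (w t : String) :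
    xs.count (w, t) = ((xs.filter (fun p => p.1 == w)).map Prod.snd).count t := by
  induction xs with
  | nil => rfl
  | cons p ps ih =>
    rw [List.count_cons, List.filter_cons]
    by_cases h : p.1 = w
    · by_cases h2 : p.2 = t
      · have : p = (w, t) := by cases p; simp_all
        simp [this, List.count_cons, ih]
      · have : p ≠ (w, t) := by cases p; simp_all
        simp [h, this, List.count_cons, h2, ih]
    · have : p ≠ (w, t) := by cases p; simp_all
      simp [h, this, ih]

-- B's running selection over distinct (tag, count) pairs is Python's max(..., key=...)
lemma pv_max?_step (key : String → Int) (x y : String) (ys : List String) :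
    PySem.List.max? (x::y::ys) key = PySem.List.max? ((if key x < key y then y else x)::ys) key := by
  by_cases h : key x < key y <;> simp [PySem.List.max?, h]

lemma pv_sel_max? (t : List String) (key : String → Int) : ∀ b,
    (t.map (fun t' => (t', key t'))).foldl pvUpd (some (b, key b))
    = (PySem.List.max? (b::t) key).map (fun m => (m, key m)) := by
  induction t with
  | nil => intro b; simp [PySem.List.max?]
  | cons y ys ih =>
    intro b
    rw [pv_max?_step]
    simp only [List.map_cons, List.foldl_cons]
    rw [show pvUpd (some (b, key b)) (y, key y)
        = if key b < key y then some (y, key y) else some (b, key b) from rfl]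
    by_cases h : key b < key y
    · simp only [if_pos h]; exact ih y
    · simp only [if_neg h]; exact ih b

lemma pv_selfold_maxD (ts : List String) (key : String → Int) :
    (((ts.map (fun t => (t, key t))).foldl pvUpd none).map Prod.fst).getD ""
    = PySem.List.maxD ts key "" := by
  cases ts with
  | nil => rfl
  | cons x t =>
    simp only [List.map_cons, List.foldl_cons]
    rw [show pvUpd none (x, key x) = some (x, key x) from rfl, pv_sel_max?, PySem.List.maxD]
    cases hm : PySem.List.max? (x::t) key with
    | none => simp
    | some m => simp

lemma pv_ofList_map_ofList {α β : Type} [BEq α] [LawfulBEq α] [BEq β] [LawfulBEq β]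
    (xs : List α) (f : α → β) :
    PySem.Set.ofList ((PySem.Set.ofList xs).map f) = PySem.Set.ofList (xs.map f) := by
  induction xs using List.reverseRecOn with
  | nil => rfl
  | append_singleton xs x ih =>
    rw [PySem.Set.ofList_append_singleton, List.map_append, List.map_singleton,
        PySem.Set.ofList_append_singleton]
    by_cases h : x ∈ PySem.Set.ofList xs
    · rw [PySem.Set.add_of_mem h, ih, PySem.Set.add_of_mem]
      rw [PySem.Set.mem_ofList]
      exact List.mem_map_of_mem (by rwa [PySem.Set.mem_ofList] at h)
    · rw [PySem.Set.add_of_not_mem h, List.map_append, List.map_singleton,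
          PySem.Set.ofList_append_singleton, ih]

-- the distinct pairs with first component w are exactly the distinct tags of w, tagged with w
lemma pv_set_filter_fst (xs : List (String × String)) (w : String) :
    (PySem.Set.ofList xs).filter (fun p => p.1 == w)
    = (PySem.Set.ofList ((xs.filter (fun p => p.1 == w)).map Prod.snd)).map (fun t => (w, t)) := by
  induction xs using List.reverseRecOn with
  | nil => rfl
  | append_singleton xs x ih =>
    rw [PySem.Set.ofList_append_singleton]
    by_cases hq : x.1 = w
    · have hfil : (xs ++ [x]).filter (fun p => p.1 == w)
          = xs.filter (fun p => p.1 == w) ++ [x] := by simp [List.filter_append, hq]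
      rw [hfil, List.map_append, List.map_singleton, PySem.Set.ofList_append_singleton]
      by_cases hmem : x ∈ PySem.Set.ofList xs
      · have hx2mem : x.2 ∈ (xs.filter (fun p => p.1 == w)).map Prod.snd := by
          refine List.mem_map_of_mem (List.mem_filter.mpr ⟨?_, by simp [hq]⟩)
          rwa [PySem.Set.mem_ofList] at hmem
        rw [PySem.Set.add_of_mem hmem, ih, PySem.Set.add_of_mem ((PySem.Set.mem_ofList _ _).mpr hx2mem)]
      · have hx2notmem : x.2 ∉ (xs.filter (fun p => p.1 == w)).map Prod.snd := by
          intro hc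
          obtain ⟨p, hp, hp2⟩ := List.mem_map.mp hc
          have hpf := List.mem_filter.mp hp
          have hp1 : p.1 = w := by simpa using hpf.2
          have hpx : p = x := by
            cases p; cases x
            simp only [Prod.mk.injEq] at hp2 ⊢
            exact ⟨by simp_all, hp2⟩
          rw [PySem.Set.mem_ofList] at hmem
          exact hmem (hpx ▸ hpf.1)
        rw [PySem.Set.add_of_not_mem hmem, List.filter_append,
            show List.filter (fun p => p.1 == w) [x] = [x] from by simp [hq], ih,
            PySem.Set.add_of_not_mem (fun hc => hx2notmem ((PySem.Set.mem_ofList _ _).mp hc)),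
            List.map_append, List.map_singleton]
        have hx : (w, x.2) = x := by cases x; simp_all
        rw [hx]
    · have hfil : (xs ++ [x]).filter (fun p => p.1 == w)
          = xs.filter (fun p => p.1 == w) := by simp [List.filter_append, hq]
      rw [hfil]
      by_cases hmem : x ∈ PySem.Set.ofList xs
      · rw [PySem.Set.add_of_mem hmem]; exact ih
      · rw [PySem.Set.add_of_not_mem hmem, List.filter_append]
        have : [x].filter (fun p => p.1 == w) = [] := by simp [hq]
        rw [this, List.append_nil]
        exact ih

-- the invariant of B's selection sweep
lemma pv_B_inv (L : List ((String × String) × Int)) :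
    (∀ w, (L.foldl pvStep (PySem.Dict.empty, PySem.Dict.empty)).1.get? w = (pvSel L w).map Prod.snd)
    ∧ (L.foldl pvStep (PySem.Dict.empty, PySem.Dict.empty)).2.keys = pvW L
    ∧ (L.foldl pvStep (PySem.Dict.empty, PySem.Dict.empty)).2.items
        = (pvW L).map (fun w => (w, ((pvSel L w).map Prod.fst).getD "")) := by
  induction L using List.reverseRecOn with
  | nil =>
    refine ⟨fun w => rfl, rfl, rfl⟩
  | append_singleton L x ih =>
    obtain ⟨ih1, ih2, ih3⟩ := ih
    rw [List.foldl_append, List.foldl_cons, List.foldl_nil]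
    set st := L.foldl pvStep (PySem.Dict.empty, PySem.Dict.empty) with hst
    have hcont1 : st.1.contains x.1.1 = (pvSel L x.1.1).isSome := by
      rw [PySem.Dict.contains_eq_isSome_get?, ih1]
      cases pvSel L x.1.1 <;> rfl
    have hcont2 : st.2.contains x.1.1 = decide (x.1.1 ∈ pvW L) := by
      rw [PySem.Dict.contains_eq_decide_mem_keys, ih2]
    rcases hsb : pvSel L x.1.1 with _ | b
    · -- word unseen: both dicts get a fresh key
      have hnotmem : x.1.1 ∉ pvW L := by
        rw [← pv_sel_isSome_iff, hsb]; simp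
      have hc1 : st.1.contains x.1.1 = false := by rw [hcont1, hsb]; rfl
      have hc2 : st.2.contains x.1.1 = false := by simp [hcont2, hnotmem]
      rw [show pvStep st x = (st.1.insert x.1.1 x.2, st.2.insert x.1.1 x.1.2) from by
        simp [pvStep, hc1]]
      refine ⟨?_, ?_, ?_⟩
      · intro w
        rw [PySem.Dict.get?_insert, pv_sel_append]
        by_cases hw : w = x.1.1
        · subst hw
          simp [hsb, pvUpd]
        · rw [if_neg hw, if_neg (show ¬ x.1.1 = w from fun h => hw (Eq.symm h))]
          exact ih1 w
      · rw [PySem.Dict.keys_insert_of_not_contains _ _ hc2, ih2, pv_W_append,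
            PySem.Set.add_of_not_mem hnotmem]
      · rw [PySem.Dict.items_insert_of_not_contains _ _ hc2, ih3, pv_W_append,
            PySem.Set.add_of_not_mem hnotmem, List.map_append, List.map_singleton]
        congr 1
        · apply List.map_congr_left
          intro w hw
          have hne : x.1.1 ≠ w := fun h => hnotmem (h ▸ hw)
          rw [pv_sel_append, if_neg hne]
        · rw [pv_sel_append, if_pos rfl, hsb]
          rfl
    · -- word already seen
      have hmem : x.1.1 ∈ pvW L := by
        rw [← pv_sel_isSome_iff, hsb]; rfl
      have hc1 : st.1.contains x.1.1 = true := by rw [hcont1, hsb]; rfl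
      have hc2 : st.2.contains x.1.1 = true := by simp [hcont2, hmem]
      have hgd : st.1.getD x.1.1 0 = b.2 := by
        rw [PySem.Dict.getD_eq_get?_getD, ih1, hsb]; rfl
      have hWeq : pvW (L ++ [x]) = pvW L := by
        rw [pv_W_append, PySem.Set.add_of_mem hmem]
      by_cases hlt : b.2 < x.2
      · -- strictly better count: overwrite
        rw [show pvStep st x = (st.1.insert x.1.1 x.2, st.2.insert x.1.1 x.1.2) from by
          simp [pvStep, hc1, hgd, hlt]]
        refine ⟨?_, ?_, ?_⟩
        · intro w
          rw [PySem.Dict.get?_insert, pv_sel_append]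
          by_cases hw : w = x.1.1
          · subst hw
            simp [hsb, pvUpd, hlt]
          · rw [if_neg hw, if_neg (show ¬ x.1.1 = w from fun h => hw (Eq.symm h))]
            exact ih1 w
        · rw [PySem.Dict.keys_insert_of_contains _ _ hc2, ih2, hWeq]
        · rw [PySem.Dict.items_insert_of_contains _ _ hc2, ih3, hWeq, List.map_map]
          apply List.map_congr_left
          intro w hw
          rw [pv_sel_append]
          by_cases hw2 : x.1.1 = w
          · subst hw2
            simp [hsb, pvUpd, hlt]
          · have hbe : (w == x.1.1) = false := by
              simp only [beq_eq_false_iff_ne, ne_eq]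
              exact fun h => hw2 (Eq.symm h)
            simp only [Function.comp_apply, hbe, Bool.false_eq_true, if_false]
            rw [if_neg hw2]
      · -- not better: state unchanged
        rw [show pvStep st x = st from by simp [pvStep, hc1, hgd, hlt]]
        refine ⟨?_, ?_, ?_⟩
        · intro w
          rw [pv_sel_append]
          by_cases hw2 : x.1.1 = w
          · subst hw2
            rw [if_pos rfl, hsb, show pvUpd (some b) (x.1.2, x.2) = some b from by
              simp [pvUpd, hlt], ← hsb]
            exact ih1 _
          · rw [if_neg hw2]; exact ih1 w
        · rw [ih2, hWeq]
        · rw [ih3, hWeq]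
          apply List.map_congr_left
          intro w hw
          rw [pv_sel_append]
          by_cases hw2 : x.1.1 = w
          · subst hw2
            rw [hsb, show pvUpd (some b) (x.1.2, x.2) = some b from by simp [pvUpd, hlt],
                if_pos rfl, ← hsb]
          · rw [if_neg hw2]

lemma pv_A_eq (corpus : List (List (String × String))) :
    train_pos_tagger corpus = pvCanon (pvPairs corpus) := by
  have h0 : train_pos_tagger corpus =
      (((pvPairs corpus).foldl
          (fun d p => d.modify p.1 (PySem.Dict.empty : PySem.Dict String Int) (fun cnt => cnt.modify p.2 0 (· + 1)))
          PySem.Dict.empty).items.foldl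
        (fun r it => r.insert it.1 (PySem.List.maxD it.2.keys (fun t => it.2.getD t 0) ""))
        PySem.Dict.empty).items := rfl
  rw [h0]
  set ps := pvPairs corpus with hps
  set wtc := ps.foldl
      (fun d p => d.modify p.1 (PySem.Dict.empty : PySem.Dict String Int) (fun cnt => cnt.modify p.2 0 (· + 1)))
      PySem.Dict.empty with hwtc
  have hkeys : wtc.keys = PySem.Set.ofList (ps.map Prod.fst) := by
    have h := PySem.Dict.keys_foldl_modify_key (l := ps) (key := Prod.fst)
      (d0 := (PySem.Dict.empty : PySem.Dict String Int))
      (f := fun _ p => fun cnt => cnt.modify p.2 0 (· + 1))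
      (d := PySem.Dict.empty)
    simp only [PySem.Dict.keys_empty] at h
    rw [hwtc, h]
    exact PySem.Set.update_nil_left _
  have hnodup : wtc.keys.Nodup := by
    rw [hkeys]; exact PySem.Set.nodup_ofList _
  have hgetD : ∀ w, wtc.getD w PySem.Dict.empty = PySem.Dict.counter (pvTags ps w) := by
    intro w
    rw [hwtc, pv_A_getD, PySem.Dict.getD_empty, PySem.Dict.counter_eq_foldl]
    rfl
  have hitems : wtc.items = wtc.keys.map (fun w => (w, wtc.getD w PySem.Dict.empty)) :=
    PySem.Dict.items_eq_map_keys wtc hnodup PySem.Dict.empty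
  have hfresh : ∀ a ∈ wtc.items,
      (PySem.Dict.empty : PySem.Dict String String).contains a.1 = false := by
    intro a _; exact PySem.Dict.contains_empty _
  have hnd2 : (wtc.items.map (fun it => it.1)).Nodup := by
    have : wtc.items.map (fun it => it.1) = wtc.keys := rfl
    rw [this]; exact hnodup
  rw [PySem.Dict.items_foldl_insert_fresh (l := wtc.items) (k := fun it => it.1)
      (v := fun it => PySem.List.maxD it.2.keys (fun t => it.2.getD t 0) "")
      (d := PySem.Dict.empty) hfresh hnd2]
  rw [show (PySem.Dict.empty : PySem.Dict String String).items = [] from rfl, List.nil_append]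
  rw [hitems, List.map_map]
  unfold pvCanon
  rw [← hkeys]
  apply List.map_congr_left
  intro w _
  simp only [Function.comp_apply]
  rw [hgetD w, PySem.Dict.keys_counter]
  congr 1
  apply pv_maxD_congr
  intro t
  rw [PySem.Dict.getD_counter]

lemma pv_B_eq (corpus : List (List (String × String))) :
    train_pos_tagger_alt corpus = pvCanon (pvPairs corpus) := by
  have h0 : train_pos_tagger_alt corpus =
      (((PySem.Dict.counter (pvPairs corpus)).items).foldl pvStep
        (PySem.Dict.empty, PySem.Dict.empty)).2.items := rfl
  rw [h0]
  set ps := pvPairs corpus with hps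
  obtain ⟨_, _, h3⟩ := pv_B_inv ((PySem.Dict.counter ps).items)
  rw [h3, PySem.Dict.items_counter]
  have hW : pvW ((PySem.Set.ofList ps).map (fun k => (k, (ps.count k : Int))))
      = PySem.Set.ofList (ps.map Prod.fst) := by
    unfold pvW
    rw [List.map_map]
    rw [show ((fun (it : (String × String) × Int) => it.1.1) ∘ (fun k => (k, (ps.count k : Int))))
        = Prod.fst from rfl]
    exact pv_ofList_map_ofList ps Prod.fst
  rw [hW]
  unfold pvCanon
  apply List.map_congr_left
  intro w _
  congr 1
  have hfil : ((PySem.Set.ofList ps).map (fun k => (k, (ps.count k : Int)))).filter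
        (fun it => it.1.1 == w)
      = ((PySem.Set.ofList ps).filter (fun p => p.1 == w)).map (fun k => (k, (ps.count k : Int))) := by
    rw [List.filter_map]
    rfl
  have hsel : pvSel ((PySem.Set.ofList ps).map (fun k => (k, (ps.count k : Int)))) w
      = ((PySem.Set.ofList (pvTags ps w)).map (fun t => (t, ((pvTags ps w).count t : Int)))).foldl pvUpd none := by
    unfold pvSel
    rw [hfil, pv_set_filter_fst, List.map_map, List.map_map]
    congr 1
    apply List.map_congr_left
    intro t _
    simp only [Function.comp_apply]
    rw [pv_count_pair]
    rfl
  rw [hsel, pv_selfold_maxD]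

-- ===== VERDICT (by name: the statement is the Claim_ definition above) =====
theorem train_pos_tagger_spec : Claim_equal_train_pos_tagger := by
  intro corpus _
  unfold Spec_train_pos_tagger
  rw [pv_A_eq, pv_B_eq]
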